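-- pv_equiv track=rewrite | github.com/aditchopra18/Custom-NER-using-BiLSTM-LSTM-and-BERT-with-Attention-Mechanims | Code/BERT/Bert_NER_Model.py | tag_annotations
-- ===== SOURCE A (Python) =====
-- def tag_annotations(sentences, annotations):
--     tagged_sentences = []
--     char_count = 0
--
--     for sentence in sentences:
--         tags = ['O'] * len(sentence)    # Initialize all tags at "O"
--         word_starts = []
--         word_ends = []
--         char_pos = 0
--
--         for word in sentence:
--             word_starts.append(char_pos)
--             char_pos += len(word)
--             word_ends.append(char_pos)
--             char_pos += 1               # WhiteSpace Character
--
--         '''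
--         Based on the character limits, the annotations are assigned
--         A custom IO tagging scheme is used
--         Labels are assigned on the basis of disease label in annotations
--         '''
--
--         for start, end, disease_info, label in annotations:
--             for i, (word_start, word_end) in enumerate(zip(word_starts, word_ends)):
--                 if word_start >= start and word_end <= end:
--                     tags[i] = 'I-' + label
--                 elif word_start < start < word_end or word_start < end < word_end:
--                     tags[i] = 'I-' + label
--
--         tagged_sentences.append((sentence, tags))
--
--     return tagged_sentences
-- ===== SOURCE B (Python) =====
-- def tag_annotations(sentences, annotations):
--     # Single pass per word: compute each word's span on the fly and take the
--     # LAST matching annotation (scan reversed, stop at first hit) instead of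
--     # building start/end arrays and repeatedly overwriting a tags array.
--     rev = list(reversed(annotations))
--     result = []
--     for sentence in sentences:
--         tags = []
--         pos = 0
--         for word in sentence:
--             ws, we = pos, pos + len(word)
--             pos = we + 1
--             tag = 'O'
--             for start, end, _info, label in rev:
--                 if (ws >= start and we <= end) or ws < start < we or ws < end < we:
--                     tag = 'I-' + label
--                     break
--             tags.append(tag)
--         result.append((sentence, tags))
--     return result
-- ===== Notes on version B (the rewrite author's own statement) =====
-- stated objective: alternative
-- what changed: B drops A's precomputed word_starts/word_ends arrays and the repeated tag-array overwriting passes: a single pass per word computes its char span on the fly and reverse-scans the annotations for the first hit (= A's last overwrite) with early exit.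
import Mathlib
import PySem

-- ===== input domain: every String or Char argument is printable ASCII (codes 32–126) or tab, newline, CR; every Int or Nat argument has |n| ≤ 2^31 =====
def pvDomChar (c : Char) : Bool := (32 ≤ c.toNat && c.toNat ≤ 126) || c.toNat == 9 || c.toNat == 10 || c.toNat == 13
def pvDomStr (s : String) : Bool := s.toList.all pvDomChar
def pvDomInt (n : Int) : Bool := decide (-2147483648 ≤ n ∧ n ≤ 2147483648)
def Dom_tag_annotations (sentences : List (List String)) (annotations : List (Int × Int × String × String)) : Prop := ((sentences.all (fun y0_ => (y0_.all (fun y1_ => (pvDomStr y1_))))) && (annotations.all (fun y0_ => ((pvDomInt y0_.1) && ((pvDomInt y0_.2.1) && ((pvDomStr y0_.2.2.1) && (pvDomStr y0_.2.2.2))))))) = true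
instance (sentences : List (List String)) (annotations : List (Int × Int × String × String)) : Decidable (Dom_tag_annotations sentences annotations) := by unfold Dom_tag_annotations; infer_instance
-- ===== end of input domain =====

-- B: one pass per word (span computed on the fly, annotations reverse-scanned for the first hit with early exit)
-- instead of A's precomputed start/end arrays and repeated overwriting of a tag array; return values equal.

-- ===== PORT A =====
def tag_annotations (sentences : List (List String)) (annotations : List (Int × Int × String × String)) : List (List String × List String) :=
  sentences.foldl (fun tagged_sentences sentence =>
    let tags0 : List String := List.replicate sentence.length "O"
    let st := sentence.foldl
      (fun (acc : List Int × List Int × Int) word =>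
        (acc.1 ++ [acc.2.2], acc.2.1 ++ [acc.2.2 + PySem.Str.len word], acc.2.2 + PySem.Str.len word + 1))
      ([], [], 0)
    let tags := annotations.foldl (fun tags ann =>
      (PySem.List.enumerate (st.1.zip st.2.1) 0).foldl (fun tags ip =>
        if decide (ip.2.1 ≥ ann.1) && decide (ip.2.2 ≤ ann.2.1) then
          PySem.List.pySetD tags ip.1 ("I-" ++ ann.2.2.2)
        else if (decide (ip.2.1 < ann.1) && decide (ann.1 < ip.2.2)) || (decide (ip.2.1 < ann.2.1) && decide (ann.2.1 < ip.2.2)) then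
          PySem.List.pySetD tags ip.1 ("I-" ++ ann.2.2.2)
        else tags) tags) tags0
    tagged_sentences ++ [(sentence, tags)]) []

-- ===== PORT B =====
-- the inner 'for start, end, _info, label in rev: if …: tag = 'I-' + label; break' loop of Source B
def pvRevScan (rev : List (Int × Int × String × String)) (ws we : Int) : String :=
  match rev.find? (fun a =>
      (decide (ws ≥ a.1) && decide (we ≤ a.2.1)) ||
      ((decide (ws < a.1) && decide (a.1 < we)) || (decide (ws < a.2.1) && decide (a.2.1 < we)))) with
  | some a => "I-" ++ a.2.2.2
  | none => "O"

def tag_annotations_alt (sentences : List (List String)) (annotations : List (Int × Int × String × String)) : List (List String × List String) :=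
  let rev := annotations.reverse
  sentences.foldl (fun result sentence =>
    let tp := sentence.foldl
      (fun (acc : List String × Int) word =>
        (acc.1 ++ [pvRevScan rev acc.2 (acc.2 + PySem.Str.len word)], acc.2 + PySem.Str.len word + 1))
      ([], 0)
    result ++ [(sentence, tp.1)]) []

-- ===== PRECONDITION & SPEC =====
def Spec_tag_annotations (sentences : List (List String)) (annotations : List (Int × Int × String × String)) (out : List (List String × List String)) : Prop := out = tag_annotations_alt sentences annotations
instance (sentences : List (List String)) (annotations : List (Int × Int × String × String)) (out : List (List String × List String)) : Decidable (Spec_tag_annotations sentences annotations out) := by unfold Spec_tag_annotations; infer_instance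

-- ===== CLAIM (what is proved, stated in full; the proofs are below) =====
def Claim_equal_tag_annotations : Prop := ∀ (sentences : List (List String)) (annotations : List (Int × Int × String × String)), Dom_tag_annotations sentences annotations → Spec_tag_annotations sentences annotations (tag_annotations sentences annotations)

-- ===== LEMMAS AND PROOFS =====

-- the (start, end) char spans of the words of a sentence whose first char is at position pos
def pvBounds : Int → List String → List (Int × Int)
  | _, [] => []
  | pos, w :: ws => (pos, pos + PySem.Str.len w) :: pvBounds (pos + PySem.Str.len w + 1) ws

-- A's (word_starts, word_ends) building loop computes pvBounds
lemma pvBoundsA (words : List String) (ss es : List Int) (pos : Int) :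
    (words.foldl
      (fun (acc : List Int × List Int × Int) word =>
        (acc.1 ++ [acc.2.2], acc.2.1 ++ [acc.2.2 + PySem.Str.len word], acc.2.2 + PySem.Str.len word + 1))
      (ss, es, pos)).1 = ss ++ (pvBounds pos words).map Prod.fst
    ∧ (words.foldl
      (fun (acc : List Int × List Int × Int) word =>
        (acc.1 ++ [acc.2.2], acc.2.1 ++ [acc.2.2 + PySem.Str.len word], acc.2.2 + PySem.Str.len word + 1))
      (ss, es, pos)).2.1 = es ++ (pvBounds pos words).map Prod.snd := by
  induction words generalizing ss es pos with
  | nil => simp [pvBounds]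
  | cons w ws ih =>
    simpa [pvBounds, List.foldl_cons] using
      ih (ss ++ [pos]) (es ++ [pos + PySem.Str.len w]) (pos + PySem.Str.len w + 1)

lemma pvSetD_nil {α : Type} (i : Int) (v : α) : PySem.List.pySetD ([] : List α) i v = [] := by
  simp only [PySem.List.pySetD, PySem.List.pySet?, PySem.List.pyIdx?, List.length_nil]
  split_ifs <;> simp

-- A's inner set-loop on an empty tag list stays empty
lemma pvLoopNil (c1 c2 : (Int × Int) → Bool) (v : String) (ps : List (Int × Int)) (s : Int) :
    (PySem.List.enumerate ps s).foldl (fun tags ip =>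
      if c1 ip.2 then PySem.List.pySetD tags ip.1 v
      else if c2 ip.2 then PySem.List.pySetD tags ip.1 v
      else tags) ([] : List String) = [] := by
  induction ps generalizing s with
  | nil => rfl
  | cons p ps ih =>
    simp only [PySem.List.enumerate_cons, List.foldl_cons, pvSetD_nil]
    split <;> [exact ih _; split <;> [exact ih _; exact ih _]]

-- A's inner set-loop with a shifted start index leaves the head alone
lemma pvShift (c1 c2 : (Int × Int) → Bool) (v : String) (ps : List (Int × Int)) (k : Nat)
    (t : String) (ts : List String) :
    (PySem.List.enumerate ps ((k : Int) + 1)).foldl (fun tags ip =>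
      if c1 ip.2 then PySem.List.pySetD tags ip.1 v
      else if c2 ip.2 then PySem.List.pySetD tags ip.1 v
      else tags) (t :: ts)
    = t :: (PySem.List.enumerate ps (k : Int)).foldl (fun tags ip =>
      if c1 ip.2 then PySem.List.pySetD tags ip.1 v
      else if c2 ip.2 then PySem.List.pySetD tags ip.1 v
      else tags) ts := by
  induction ps generalizing k t ts with
  | nil => rfl
  | cons p ps ih =>
    have hcast : ((k : Int) + 1) = ((k + 1 : Nat) : Int) := by push_cast; ring
    simp only [PySem.List.enumerate_cons, List.foldl_cons]
    have hset : PySem.List.pySetD (t :: ts) ((k : Int) + 1) v = t :: PySem.List.pySetD ts (k : Int) v := by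
      rw [hcast, PySem.List.pySetD_natCast, PySem.List.pySetD_natCast, List.set_cons_succ]
    have hnext : ((k : Int) + 1 + 1) = (((k + 1 : Nat) : Int) + 1) := by push_cast; ring
    rw [hset]
    split
    · rw [hnext, ih (k + 1), Nat.cast_add, Nat.cast_one]
    · split
      · rw [hnext, ih (k + 1), Nat.cast_add, Nat.cast_one]
      · rw [hnext, ih (k + 1), Nat.cast_add, Nat.cast_one]

-- A's inner set-loop is a pointwise update of the tag list
lemma pvLoop (c1 c2 : (Int × Int) → Bool) (v : String) (ps : List (Int × Int)) (tags : List String) :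
    (PySem.List.enumerate ps 0).foldl (fun tags ip =>
      if c1 ip.2 then PySem.List.pySetD tags ip.1 v
      else if c2 ip.2 then PySem.List.pySetD tags ip.1 v
      else tags) tags
    = (tags.zipWith (fun t p => if c1 p then v else if c2 p then v else t) ps) ++ tags.drop ps.length := by
  induction ps generalizing tags with
  | nil => simp
  | cons p ps ih =>
    cases tags with
    | nil =>
      simp only [PySem.List.enumerate_cons, List.foldl_cons, pvSetD_nil,
        List.zipWith_nil_left, List.drop_nil, List.nil_append]
      split_ifs <;> exact pvLoopNil c1 c2 v ps (0 + 1)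
    | cons t ts =>
      simp only [PySem.List.enumerate_cons, List.foldl_cons]
      have h0 : PySem.List.pySetD (t :: ts) (0 : Int) v = v :: ts := by
        have hz : ((0 : Int)) = ((0 : Nat) : Int) := by norm_num
        rw [hz, PySem.List.pySetD_natCast]; rfl
      rw [h0]
      have hx : (if c1 p then v :: ts else if c2 p then v :: ts else t :: ts)
          = (if c1 p then v else if c2 p then v else t) :: ts := by
        split_ifs <;> rfl
      rw [hx]
      have hc : ((0 : Int) + 1) = (((0 : Nat) : Int) + 1) := by norm_num
      rw [hc, pvShift c1 c2 v ps 0, Nat.cast_zero, ih ts]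
      simp

-- zipWith over a map of the same list is a map
lemma pvZipMap {β : Type} (h : String → β → String) (f : β → String) (ps : List β) :
    List.zipWith h (ps.map f) ps = ps.map (fun p => h (f p) p) := by
  induction ps with
  | nil => rfl
  | cons p ps ih => simp [ih]

-- per-span tag after A's whole annotation pass
lemma pvOuter (anns : List (Int × Int × String × String)) (ps : List (Int × Int)) (f0 : (Int × Int) → String) :
    anns.foldl (fun tags ann =>
      (PySem.List.enumerate ps 0).foldl (fun tags ip =>
        if decide (ip.2.1 ≥ ann.1) && decide (ip.2.2 ≤ ann.2.1) then
          PySem.List.pySetD tags ip.1 ("I-" ++ ann.2.2.2)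
        else if (decide (ip.2.1 < ann.1) && decide (ann.1 < ip.2.2)) || (decide (ip.2.1 < ann.2.1) && decide (ann.2.1 < ip.2.2)) then
          PySem.List.pySetD tags ip.1 ("I-" ++ ann.2.2.2)
        else tags) tags) (ps.map f0)
    = ps.map (fun p => anns.foldl (fun t ann =>
        if decide (p.1 ≥ ann.1) && decide (p.2 ≤ ann.2.1) then "I-" ++ ann.2.2.2
        else if (decide (p.1 < ann.1) && decide (ann.1 < p.2)) || (decide (p.1 < ann.2.1) && decide (ann.2.1 < p.2)) then "I-" ++ ann.2.2.2
        else t) (f0 p)) := by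
  induction anns generalizing f0 with
  | nil => rfl
  | cons a anns ih =>
    simp only [List.foldl_cons]
    rw [pvLoop (fun p => decide (p.1 ≥ a.1) && decide (p.2 ≤ a.2.1))
        (fun p => (decide (p.1 < a.1) && decide (a.1 < p.2)) || (decide (p.1 < a.2.1) && decide (a.2.1 < p.2)))
        ("I-" ++ a.2.2.2) ps (ps.map f0)]
    have hd : List.drop ps.length (ps.map f0) = [] := by
      simp [List.drop_eq_nil_iff]
    rw [hd, List.append_nil, pvZipMap]
    exact ih (fun p => if decide (p.1 ≥ a.1) && decide (p.2 ≤ a.2.1) then "I-" ++ a.2.2.2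
      else if (decide (p.1 < a.1) && decide (a.1 < p.2)) || (decide (p.1 < a.2.1) && decide (a.2.1 < p.2)) then "I-" ++ a.2.2.2
      else p |> fun _ => f0 p)

-- B's per-span tag: the last matching annotation wins, i.e. the first match in the reversed list
lemma pvLast (anns : List (Int × Int × String × String)) (ws we : Int) (t0 : String) :
    anns.foldl (fun t ann =>
      if decide (ws ≥ ann.1) && decide (we ≤ ann.2.1) then "I-" ++ ann.2.2.2
      else if (decide (ws < ann.1) && decide (ann.1 < we)) || (decide (ws < ann.2.1) && decide (ann.2.1 < we)) then "I-" ++ ann.2.2.2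
      else t) t0
    = match anns.reverse.find? (fun a =>
        (decide (ws ≥ a.1) && decide (we ≤ a.2.1)) ||
        ((decide (ws < a.1) && decide (a.1 < we)) || (decide (ws < a.2.1) && decide (a.2.1 < we)))) with
      | some a => "I-" ++ a.2.2.2
      | none => t0 := by
  induction anns generalizing t0 with
  | nil => rfl
  | cons a anns ih =>
    simp only [List.foldl_cons, List.reverse_cons, List.find?_append]
    rw [ih]
    cases hf : anns.reverse.find? (fun a =>
        (decide (ws ≥ a.1) && decide (we ≤ a.2.1)) ||
        ((decide (ws < a.1) && decide (a.1 < we)) || (decide (ws < a.2.1) && decide (a.2.1 < we)))) with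
    | some b => simp
    | none =>
      cases h1 : (decide (ws ≥ a.1) && decide (we ≤ a.2.1)) <;>
        cases h2 : ((decide (ws < a.1) && decide (a.1 < we)) || (decide (ws < a.2.1) && decide (a.2.1 < we))) <;>
          simp [List.find?, h1, h2]

-- B's per-sentence loop maps pvRevScan over the word spans
lemma pvBfold (rev : List (Int × Int × String × String)) (words : List String)
    (acc0 : List String) (pos : Int) :
    (words.foldl (fun (acc : List String × Int) word =>
      (acc.1 ++ [pvRevScan rev acc.2 (acc.2 + PySem.Str.len word)], acc.2 + PySem.Str.len word + 1)) (acc0, pos)).1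
    = acc0 ++ (pvBounds pos words).map (fun p => pvRevScan rev p.1 p.2) := by
  induction words generalizing acc0 pos with
  | nil => simp [pvBounds]
  | cons w ws ih =>
    simpa [pvBounds] using
      ih (acc0 ++ [pvRevScan rev pos (pos + PySem.Str.len w)]) (pos + PySem.Str.len w + 1)

-- the all-'O' initial tag list, indexed by the spans
lemma pvRepl (pos : Int) (words : List String) :
    (pvBounds pos words).map (fun _ => "O") = List.replicate words.length "O" := by
  induction words generalizing pos with
  | nil => rfl
  | cons w ws ih => simp [pvBounds, List.replicate_succ, ih]

-- ===== VERDICT (by name: the statement is the Claim_ definition above) =====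
theorem tag_annotations_spec : Claim_equal_tag_annotations := by
  intro sentences annotations _
  unfold Spec_tag_annotations
  simp only [tag_annotations, tag_annotations_alt, PySem.List.foldl_append_singleton_eq_map,
    List.nil_append]
  refine List.map_congr_left ?_
  intro s _
  simp only [Prod.mk.injEq, true_and]
  obtain ⟨h1, h2⟩ := pvBoundsA s [] [] 0
  simp only [List.nil_append] at h1 h2
  rw [h1, h2, List.zip_map']
  simp only [Prod.mk.eta, List.map_id']
  rw [← pvRepl 0 s, pvOuter annotations (pvBounds 0 s) (fun _ => "O"),
    pvBfold annotations.reverse s [] 0, List.nil_append]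
  refine List.map_congr_left ?_
  intro p _
  rw [pvLast annotations p.1 p.2 "O"]
  simp [pvRevScan]
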